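-- pv_equiv track=rewrite | github.com/cutyrei/project-euler | p037_Truncatable primes.py | check
-- ===== SOURCE A (Python) =====
-- def check(n):
--     s = str(n)
--     if s[0] not in "2357": # 첫째 자리 수 확인
--         return False
--     for t in "024568": # 둘째 이후 자리 수 확인
--         if t in s[1:]:
--             return False
--     return True
-- ===== SOURCE B (Python) =====
-- def check(n):
--     while n >= 10:
--         if n % 10 not in (1, 3, 7, 9):
--             return False
--         n //= 10
--     return n in (2, 3, 5, 7)
-- ===== Notes on version B (the rewrite author's own statement) =====
-- stated objective: alternative
-- what changed: B drops the string conversion entirely and tests digits arithmetically: a single divmod loop checks each trailing digit against {1,3,7,9} and the remaining leading digit against {2,3,5,7}, instead of A's loop over six forbidden digits each doing a substring scan of str(n).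
import Mathlib
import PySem

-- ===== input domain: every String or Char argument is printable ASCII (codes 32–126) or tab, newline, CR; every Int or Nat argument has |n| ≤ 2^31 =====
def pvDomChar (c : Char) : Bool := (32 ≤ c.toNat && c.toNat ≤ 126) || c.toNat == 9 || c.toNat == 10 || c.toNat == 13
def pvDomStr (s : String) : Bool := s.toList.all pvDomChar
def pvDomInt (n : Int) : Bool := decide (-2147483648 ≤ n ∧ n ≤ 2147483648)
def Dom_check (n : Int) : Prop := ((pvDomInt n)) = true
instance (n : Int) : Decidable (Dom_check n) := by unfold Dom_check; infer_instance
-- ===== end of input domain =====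

-- B replaces A's string screen (forbidden-digit substring scans over str(n)) with a pure divmod
-- loop over the digits of n; same return value on every input (both are total).


-- ===== PORT A =====
-- for t in "024568": if t in s[1:]: return False  — `rest` is s[1:]
def checkLoopA (rest : List Char) : List Char → Bool
  | [] => true
  | t :: ts => if PySem.Chars.isIn [t] rest then false else checkLoopA rest ts

def check (n : Int) : Bool :=
  let s := PySem.Int.toChars n
  match PySem.List.pyGet? s 0 with
  | none => false   -- s[0] IndexError: unreachable, str(n) is never empty
  | some c =>
    if !(PySem.Chars.isIn [c] ['2', '3', '5', '7']) then false
    else checkLoopA (PySem.List.slice s (some 1) none) ['0', '2', '4', '5', '6', '8']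

-- ===== PORT B =====
-- while n >= 10: if n % 10 not in (1,3,7,9): return False; n //= 10 — then: n in (2,3,5,7)
def altLoop (n : Int) : Bool :=
  if 10 ≤ n then
    if !(([1, 3, 7, 9] : List Int).contains (PySem.Int.mod n 10)) then false
    else altLoop (PySem.Int.floordiv n 10)
  else ([2, 3, 5, 7] : List Int).contains n
termination_by n.toNat
decreasing_by
  rw [PySem.Int.floordiv_eq_ediv_of_pos (by omega)]
  omega

def check_alt (n : Int) : Bool := altLoop n

-- ===== PRECONDITION & SPEC =====
def Spec_check (n : Int) (out : Bool) : Prop := out = check_alt n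
instance (n : Int) (out : Bool) : Decidable (Spec_check n out) := by unfold Spec_check; infer_instance

-- ===== CLAIM (what is proved, stated in full; the proofs are below) =====
def Claim_equal_check : Prop := ∀ (n : Int), Dom_check n → Spec_check n (check n)

-- ===== LEMMAS AND PROOFS =====

-- 'c in s' for a one-character pattern is list membership
theorem isIn_singleton (t : Char) (xs : List Char) :
    PySem.Chars.isIn [t] xs = xs.contains t := by
  by_cases h : t ∈ xs
  · rw [(PySem.Chars.isIn_iff_infix _ _).mpr ((List.singleton_infix_iff t xs).mpr h)]; simp [h]
  · rw [(PySem.Chars.isIn_eq_false_iff _ _).mpr (fun hh => h ((List.singleton_infix_iff t xs).mp hh))]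
    simp [h]

-- the digit list of a nonnegative number, most-significant digit first
def digs (m : Nat) : List Char :=
  if _ : m < 10 then [Nat.digitChar m]
  else digs (m / 10) ++ [Nat.digitChar (m % 10)]
termination_by m
decreasing_by omega

theorem digs_lt {m : Nat} (h : m < 10) : digs m = [Nat.digitChar m] := by
  rw [digs]; simp [h]

theorem digs_ge {m : Nat} (h : ¬ m < 10) : digs m = digs (m / 10) ++ [Nat.digitChar (m % 10)] := by
  rw [digs]; simp [h]

theorem digs_ne_nil (m : Nat) : digs m ≠ [] := by
  by_cases h : m < 10
  · rw [digs_lt h]; simp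
  · rw [digs_ge h]; simp

-- Nat.toDigits (what str(n) prints for n ≥ 0) is digs
theorem toDigitsCore_eq_digs (f : Nat) : ∀ (m : Nat) (ds : List Char), 0 < f → m < 10 ^ f →
    Nat.toDigitsCore 10 f m ds = digs m ++ ds := by
  induction f with
  | zero => intro m ds hf h; omega
  | succ f ih =>
    intro m ds _ h
    rw [Nat.toDigitsCore]
    by_cases h10 : m / 10 = 0
    · have hm : m < 10 := by omega
      simp [h10, digs_lt hm, Nat.mod_eq_of_lt hm]
    · have hfpos : 0 < f := by
        rcases Nat.eq_zero_or_pos f with hf0 | hf0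
        · subst hf0; norm_num at h; omega
        · exact hf0
      have hdiv : m / 10 < 10 ^ f := by
        have h1 : m < 10 ^ f * 10 := by rw [mul_comm, ← pow_succ']; exact h
        omega
      rw [if_neg h10, ih (m / 10) _ hfpos hdiv]
      conv_rhs => rw [digs_ge (by omega : ¬ m < 10)]
      simp

theorem toDigits_eq_digs (m : Nat) : Nat.toDigits 10 m = digs m := by
  have h : m < 10 ^ (m + 1) := by
    calc m < m + 1 := by omega
      _ ≤ 10 ^ (m + 1) := (Nat.lt_pow_self (by norm_num)).le
  simpa using toDigitsCore_eq_digs (m + 1) m [] (by omega) h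

-- every char of digs is a decimal digit
theorem digitChar_mem_digits {r : Nat} (h : r < 10) :
    Nat.digitChar r ∈ ['0','1','2','3','4','5','6','7','8','9'] := by
  interval_cases r <;> decide

theorem digs_digits (m : Nat) : ∀ c ∈ digs m, c ∈ ['0','1','2','3','4','5','6','7','8','9'] := by
  induction m using Nat.strong_induction_on with
  | _ m ih =>
    intro c hc
    by_cases h : m < 10
    · rw [digs_lt h] at hc; simp at hc; subst hc; exact digitChar_mem_digits h
    · rw [digs_ge h] at hc
      rcases List.mem_append.mp hc with h1 | h1
      · exact ih (m / 10) (by omega) c h1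
      · simp at h1; subst h1; exact digitChar_mem_digits (Nat.mod_lt _ (by omega))

-- A's inner loop is a disjointness scan
theorem checkLoopA_eq_all (rest ts : List Char) :
    checkLoopA rest ts = ts.all (fun t => !rest.contains t) := by
  induction ts with
  | nil => rfl
  | cons t ts ih =>
    simp only [checkLoopA, List.all_cons, ← ih, isIn_singleton]
    cases rest.contains t <;> simp

-- swap the quantifier and use digit-ness: forbidden-disjoint = all-allowed
theorem forb_eq_allow (cs : List Char)
    (hd : ∀ c ∈ cs, c ∈ ['0','1','2','3','4','5','6','7','8','9']) :
    (['0','2','4','5','6','8'].all (fun t => !cs.contains t))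
      = cs.all (fun c => ['1','3','7','9'].contains c) := by
  rw [Bool.eq_iff_iff]
  simp only [List.all_eq_true, List.contains_eq_mem, Bool.not_eq_eq_eq_not, Bool.not_true,
    decide_eq_false_iff_not, decide_eq_true_eq]
  constructor
  · intro h c hc
    have hd10 := hd c hc
    fin_cases hd10 <;> first | decide | exact absurd hc (h _ (by decide))
  · intro h t ht hmem
    have := h t hmem
    fin_cases ht <;> simp_all

-- the common reference form of both programs on a nonnegative input
def ref (m : Nat) : Bool :=
  match digs m with
  | [] => false
  | c :: cs => (['2','3','5','7'].contains c) && cs.all (fun d => ['1','3','7','9'].contains d)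

theorem check_eq_ref (m : Nat) : check (m : Int) = ref m := by
  have hnn : ¬ ((m : Int) < 0) := by omega
  unfold check ref
  simp only [PySem.Int.toChars, if_neg hnn, Int.toNat_natCast, toDigits_eq_digs]
  rcases hcs : digs m with _ | ⟨c, cs⟩
  · exact absurd hcs (digs_ne_nil m)
  · simp only [PySem.List.pyGet?_zero_cons, PySem.List.slice_from_one, List.tail_cons]
    have hsub : ∀ d ∈ cs, d ∈ ['0','1','2','3','4','5','6','7','8','9'] :=
      fun d hdm => digs_digits m d (by rw [hcs]; exact List.mem_cons_of_mem _ hdm)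
    rw [checkLoopA_eq_all, forb_eq_allow cs hsub, isIn_singleton]
    cases (['2','3','5','7'].contains c) <;> simp

theorem altLoop_eq_ref (m : Nat) : altLoop (m : Int) = ref m := by
  induction m using Nat.strong_induction_on with
  | _ m ih =>
    by_cases h : m < 10
    · rw [altLoop]
      simp only [if_neg (by omega : ¬ ((10 : Int) ≤ (m : Int)))]
      unfold ref
      rw [digs_lt h]
      interval_cases m <;> decide
    · rw [altLoop]
      have hmod : PySem.Int.mod (m : Int) 10 = ((m % 10 : Nat) : Int) := by
        exact_mod_cast PySem.Int.mod_natCast m 10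
      have hdiv : PySem.Int.floordiv (m : Int) 10 = ((m / 10 : Nat) : Int) := by
        exact_mod_cast PySem.Int.floordiv_natCast m 10
      simp only [if_pos (by omega : (10 : Int) ≤ (m : Int)), hmod, hdiv, ih (m / 10) (by omega)]
      unfold ref
      rw [digs_ge h]
      rcases hcs : digs (m / 10) with _ | ⟨c, cs⟩
      · exact absurd hcs (digs_ne_nil _)
      · simp only [List.cons_append, List.all_append, List.all_cons, List.all_nil, Bool.and_true]
        have hr : m % 10 < 10 := Nat.mod_lt _ (by omega)
        set r := m % 10 with hrdef
        have hlast : (([1,3,7,9] : List Int).contains ((r : Nat) : Int))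
            = ['1','3','7','9'].contains (Nat.digitChar r) := by
          interval_cases r <;> decide
        rw [hlast]
        cases ['1','3','7','9'].contains (Nat.digitChar r) <;> simp

-- ===== VERDICT (by name: the statement is the Claim_ definition above) =====
theorem check_spec : Claim_equal_check := by
  intro n _
  unfold Spec_check check_alt
  by_cases hn : 0 ≤ n
  · obtain ⟨m, rfl⟩ := Int.eq_ofNat_of_zero_le hn
    rw [check_eq_ref, altLoop_eq_ref]
  · -- negative n: str(n) starts with '-', both sides are False
    have hA : check n = false := by
      unfold check
      simp [PySem.Int.toChars, if_pos (by omega : n < 0),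
        (by decide : PySem.Chars.isIn ['-'] ['2','3','5','7'] = false)]
    rw [hA, altLoop, if_neg (by omega : ¬ ((10 : Int) ≤ n))]
    simp only [List.contains_eq_mem, List.mem_cons, List.not_mem_nil, or_false]
    have hne : ¬ (n = 2 ∨ n = 3 ∨ n = 5 ∨ n = 7) := by omega
    simp [hne]
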